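-- pv_equiv track=rewrite | github.com/Daniel-Sottovia/INE5603 | Exercícios/lista12.py | diagonal_super
-- ===== SOURCE A (Python) =====
-- def diagonal_super(matriz):
--     tam = len(matriz)
--     diag = 1
--     final = []
--     while diag < tam:
--         l = 0
--         c = diag
--         temp = []
--         while c < tam:
--             temp.append(matriz[l][c])
--             l += 1
--             c += 1
--
--         diag += 1
--
--         if 0 in temp:
--             final.append(temp)
--
--     return final
-- ===== SOURCE B (Python) =====
-- def diagonal_super(matriz):
--     tam = len(matriz)
--     buckets = [[] for _ in range(tam - 1)]
--     for l in range(tam):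
--         for c in range(l + 1, tam):
--             buckets[c - l - 1].append(matriz[l][c])
--     return [b for b in buckets if 0 in b]
-- ===== Notes on version B (the rewrite author's own statement) =====
-- stated objective: alternative
-- what changed: Replaces A's per-diagonal walk (one inner while-loop per super-diagonal) by a single row-major pass over the matrix that distributes each above-diagonal entry into a bucket list indexed by its offset, filtering the buckets afterwards.
import Mathlib
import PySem

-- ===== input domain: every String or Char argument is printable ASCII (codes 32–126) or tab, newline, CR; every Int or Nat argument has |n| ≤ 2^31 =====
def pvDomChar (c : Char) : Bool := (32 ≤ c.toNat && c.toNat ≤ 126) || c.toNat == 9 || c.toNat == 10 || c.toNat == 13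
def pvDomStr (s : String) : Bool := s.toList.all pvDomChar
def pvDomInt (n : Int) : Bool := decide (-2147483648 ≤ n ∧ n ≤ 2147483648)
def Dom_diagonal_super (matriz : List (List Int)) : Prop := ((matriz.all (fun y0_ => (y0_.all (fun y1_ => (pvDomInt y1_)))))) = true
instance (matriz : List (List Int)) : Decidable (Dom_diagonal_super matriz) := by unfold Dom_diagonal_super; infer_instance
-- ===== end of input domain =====

-- B makes one row-major pass filling offset-indexed buckets instead of A's walk per diagonal
-- (objective: alternative decomposition, same cost); return values proved equal on Pre_.

-- ===== PORT A =====
-- matriz[l][c]: both indices are nonnegative loop counters and, under Pre_, in range,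
-- so plain getD is exact there (outside Pre_ the Python raises IndexError).
def pvRowGet (matriz : List (List Int)) (l c : Nat) : Int := (matriz.getD l []).getD c 0

-- inner 'while c < tam' loop collecting temp
def pvTempA (matriz : List (List Int)) (tam l c : Nat) : List Int :=
  if c < tam then pvRowGet matriz l c :: pvTempA matriz tam (l + 1) (c + 1) else []
termination_by tam - c

-- outer 'while diag < tam' loop
def pvLoopA (matriz : List (List Int)) (tam diag : Nat) (final : List (List Int)) :
    List (List Int) :=
  if diag < tam then
    let temp := pvTempA matriz tam 0 diag
    pvLoopA matriz tam (diag + 1) (if temp.contains 0 then final ++ [temp] else final)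
  else final
termination_by tam - diag

def diagonal_super (matriz : List (List Int)) : List (List Int) :=
  pvLoopA matriz matriz.length 1 []

-- ===== PORT B =====
-- buckets[k].append(x)  (set is a no-op out of range, unreachable under Pre_)
def pvBSet (B : List (List Int)) (k : Nat) (x : Int) : List (List Int) :=
  B.set k ((B.getD k []) ++ [x])

def diagonal_super_alt (matriz : List (List Int)) : List (List Int) :=
  let tam := matriz.length
  let init : List (List Int) := (List.range (tam - 1)).map (fun _ => [])
  let buckets :=
    (List.range tam).foldl
      (fun B l =>
        (List.range' (l + 1) (tam - (l + 1))).foldl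
          (fun B c => pvBSet B (c - l - 1) (pvRowGet matriz l c)) B)
      init
  buckets.filter (fun b => b.contains 0)

-- ===== PRECONDITION & SPEC =====
-- A (and B) raise IndexError on ragged matrices: every row except the last must have
-- length ≥ len(matriz); exactly those rows/columns are read.
def Pre_diagonal_super (matriz : List (List Int)) : Prop :=
  ∀ row ∈ matriz.dropLast, matriz.length ≤ row.length
instance (matriz : List (List Int)) : Decidable (Pre_diagonal_super matriz) := by
  unfold Pre_diagonal_super; infer_instance

def pvWitness_diagonal_super : List (List Int) := [[1, 0, 3], [4, 5, 6], [7, 8, 9]]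

def Spec_diagonal_super (matriz : List (List Int)) (out : List (List Int)) : Prop :=
  out = diagonal_super_alt matriz
instance (matriz : List (List Int)) (out : List (List Int)) :
    Decidable (Spec_diagonal_super matriz out) := by unfold Spec_diagonal_super; infer_instance

-- ===== CLAIM (what is proved, stated in full; the proofs are below) =====
def Claim_equal_diagonal_super : Prop :=
  ∀ (matriz : List (List Int)), Dom_diagonal_super matriz → Pre_diagonal_super matriz →
    Spec_diagonal_super matriz (diagonal_super matriz)

-- ===== LEMMAS AND PROOFS =====

-- the super-diagonal with offset d, truncated to its first k entries
def pvDiagPrefix (matriz : List (List Int)) (d k : Nat) : List Int :=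
  (List.range k).map (fun i => pvRowGet matriz i (i + d))

theorem pvTempA_eq (matriz : List (List Int)) (tam : Nat) :
    ∀ c l, pvTempA matriz tam l c =
      (List.range (tam - c)).map (fun i => pvRowGet matriz (l + i) (c + i)) := by
  intro c
  induction' h : tam - c with n ih generalizing c
  · intro l; rw [pvTempA]; simp [show ¬ c < tam by omega]
  · intro l
    rw [pvTempA]
    have hc : c < tam := by omega
    have h2 : tam - (c + 1) = n := by omega
    simp only [hc, if_pos, List.range_succ_eq_map, List.map_cons, List.map_map]
    rw [ih (c + 1) h2 (l + 1)]
    simp [Function.comp_def, Nat.add_assoc, Nat.add_comm 1]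

theorem pvLoopA_eq (matriz : List (List Int)) (tam : Nat) :
    ∀ diag final, pvLoopA matriz tam diag final =
      final ++ ((List.range' diag (tam - diag)).map (fun d => pvTempA matriz tam 0 d)).filter
        (fun t => t.contains 0) := by
  intro diag
  induction' h : tam - diag with n ih generalizing diag
  · intro final; rw [pvLoopA]; simp [show ¬ diag < tam by omega]
  · intro final
    rw [pvLoopA]
    have hd : diag < tam := by omega
    have h2 : tam - (diag + 1) = n := by omega
    simp only [hd, if_pos]
    rw [ih (diag + 1) h2, List.range'_succ]
    simp only [List.map_cons, List.filter_cons]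
    by_cases hz : (0 : Int) ∈ pvTempA matriz tam 0 diag <;> simp [hz]

-- the inner fold over one row updates buckets 0..n-1 in order
theorem pvInnerFold (g : Nat → Int) (a : Nat) :
    ∀ (n : Nat) (B : List (List Int)), n ≤ B.length →
      (List.range' a n).foldl (fun B c => pvBSet B (c - a) (g c)) B =
        B.mapIdx (fun j v => if j < n then v ++ [g (a + j)] else v) := by
  intro n
  induction n with
  | zero =>
    intro B _
    simp only [List.range'_zero, List.foldl_nil]
    apply List.ext_getElem <;> simp
  | succ n ih =>
    intro B hB
    rw [List.range'_concat, List.foldl_append]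
    rw [ih B (by omega)]
    simp only [List.foldl_cons, List.foldl_nil, pvBSet]
    apply List.ext_getElem
    · simp
    · intro j hj hj'
      simp only [List.length_set, List.length_mapIdx] at hj
      rw [List.getElem_set]
      simp only [Nat.one_mul, Nat.add_sub_cancel_left]
      by_cases hjn : n = j
      · subst hjn
        have hlt : n < (B.mapIdx fun j v => if j < n then v ++ [g (a + j)] else v).length := by
          simpa using (by omega : n < B.length)
        rw [if_pos rfl, List.getD_eq_getElem _ _ hlt]
        simp only [List.getElem_mapIdx]
        simp [show n < n + 1 by omega]
      · rw [if_neg hjn]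
        simp only [List.getElem_mapIdx]
        by_cases hlt : j < n
        · simp [hlt, show j < n + 1 by omega]
        · simp [hlt, show ¬ j < n + 1 by omega]

-- mapIdx after map-over-range collapses to map-over-range
theorem pvMapIdx_map_range {α : Type} (n : Nat) (f : Nat → α) (F : Nat → α → α) :
    ((List.range n).map f).mapIdx F = (List.range n).map (fun j => F j (f j)) := by
  apply List.ext_getElem
  · simp
  · intro j hj hj'
    simp

-- the outer fold: after processing rows 0..l-1 each bucket j holds the first
-- min l (tam-1-j) entries of the super-diagonal with offset j+1
theorem pvOuterFold (matriz : List (List Int)) (tam : Nat) :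
    ∀ l, l ≤ tam →
      (List.range l).foldl
        (fun B l =>
          (List.range' (l + 1) (tam - (l + 1))).foldl
            (fun B c => pvBSet B (c - l - 1) (pvRowGet matriz l c)) B)
        ((List.range (tam - 1)).map (fun _ => [])) =
      (List.range (tam - 1)).map (fun j => pvDiagPrefix matriz (j + 1) (min l (tam - 1 - j))) := by
  intro l
  induction l with
  | zero => intro _; simp [pvDiagPrefix]
  | succ l ih =>
    intro hl
    rw [List.range_succ, List.foldl_append, ih (by omega)]
    simp only [List.foldl_cons, List.foldl_nil]
    have hlen : tam - (l + 1) ≤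
        ((List.range (tam - 1)).map
          (fun j => pvDiagPrefix matriz (j + 1) (min l (tam - 1 - j)))).length := by
      simp; omega
    have := pvInnerFold (fun c => pvRowGet matriz l c) (l + 1) (tam - (l + 1))
      ((List.range (tam - 1)).map (fun j => pvDiagPrefix matriz (j + 1) (min l (tam - 1 - j))))
      hlen
    simp only [show ∀ c, c - l - 1 = c - (l + 1) from fun c => by omega] at this ⊢
    rw [this, pvMapIdx_map_range]
    apply List.map_congr_left
    intro j hj
    simp only [List.mem_range] at hj
    by_cases hc : j < tam - (l + 1)
    · have h1 : min l (tam - 1 - j) = l := by omega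
      have h2 : min (l + 1) (tam - 1 - j) = l + 1 := by omega
      simp only [hc, if_pos, h1, h2, pvDiagPrefix, List.range_succ, List.map_append,
        List.map_cons, List.map_nil, show l + 1 + j = l + (j + 1) from by omega]
    · have h1 : min l (tam - 1 - j) = tam - 1 - j := by omega
      have h2 : min (l + 1) (tam - 1 - j) = tam - 1 - j := by omega
      simp [hc, h1, h2]

-- ===== VERDICT (by name: the statement is the Claim_ definition above) =====
theorem diagonal_super_spec : Claim_equal_diagonal_super := by
  intro matriz _ _
  unfold Spec_diagonal_super diagonal_super diagonal_super_alt
  dsimp only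
  set tam := matriz.length with htam
  rw [pvLoopA_eq, pvOuterFold matriz tam tam (le_refl _)]
  simp only [List.nil_append]
  congr 1
  rw [List.range'_eq_map_range, List.map_map]
  apply List.map_congr_left
  intro j hj
  simp only [List.mem_range] at hj
  simp only [Function.comp_def]
  rw [pvTempA_eq]
  unfold pvDiagPrefix
  have h1 : min tam (tam - 1 - j) = tam - 1 - j := by omega
  have h2 : tam - (1 + j) = tam - 1 - j := by omega
  rw [h1, h2]
  apply List.map_congr_left
  intro i _
  simp [Nat.add_comm, Nat.add_comm 1 j]
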